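-- pv_equiv track=rewrite | github.com/Kyraminol/MuseigennAnime | app/modules/vvvvid.py | _decrypt_url
-- ===== SOURCE A (Python) =====
-- def _decrypt_url(url):
--     if not url:
--         return None
--     g = "MNOPIJKL89+/4567UVWXQRSTEFGHABCDcdefYZabstuvopqr0123wxyzklmnghij"
--
--     def f(m):
--         pp = []
--         o = 0
--         b = False
--         m_len = len(m)
--         while not b and o < m_len:
--             n = m[o] << 2
--             o += 1
--             k = -1
--             j = -1
--             if o < m_len:
--                 n += m[o] >> 4
--                 o += 1
--                 if o < m_len:
--                     k = (m[o - 1] << 4) & 255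
--                     k += m[o] >> 2
--                     o += 1
--                     if o < m_len:
--                         j = (m[o - 1] << 6) & 255
--                         j += m[o]
--                         o += 1
--                     else:
--                         b = True
--                 else:
--                     b = True
--             else:
--                 b = True
--             pp.append(n)
--             if k != -1:
--                 pp.append(k)
--             if j != -1:
--                 pp.append(j)
--         return pp
--
--     c = []
--     for e in url:
--         c.append(g.index(e))
--     c_len = len(c)
--     for e in range(c_len * 2 - 1, -1, -1):
--         a = c[e % c_len] ^ c[(e + 1) % c_len]
--         c[e % c_len] = a
--     c = f(c)
--     d = ''
--     for e in c:
--         d += chr(e)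
--     return d
-- ===== SOURCE B (Python) =====
-- def _decrypt_url(url):
--     if not url:
--         return None
--     g = "MNOPIJKL89+/4567UVWXQRSTEFGHABCDcdefYZabstuvopqr0123wxyzklmnghij"
--     c = [g.index(e) for e in url]
--     n = len(c)
--     for e in range(n * 2 - 1, -1, -1):
--         c[e % n] ^= c[(e + 1) % n]
--     out = []
--     for i in range(0, n, 4):
--         chunk = c[i:i + 4]
--         out.append((chunk[0] << 2) + ((chunk[1] >> 4) if len(chunk) > 1 else 0))
--         if len(chunk) > 2:
--             out.append(((chunk[1] << 4) & 255) + (chunk[2] >> 2))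
--         if len(chunk) > 3:
--             out.append(((chunk[2] << 6) & 255) + chunk[3])
--     return ''.join(map(chr, out))
-- ===== Notes on version B (the rewrite author's own statement) =====
-- stated objective: simpler
-- what changed: The inner base64-style decoder's while-loop with break flag and -1 sentinels is replaced by consuming 4-index chunks and emitting 1/1/2/3 bytes by chunk length; the alphabet scan becomes a comprehension and the output string is built with ''.join(map(chr,...)) instead of repeated concatenation.
import Mathlib
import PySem

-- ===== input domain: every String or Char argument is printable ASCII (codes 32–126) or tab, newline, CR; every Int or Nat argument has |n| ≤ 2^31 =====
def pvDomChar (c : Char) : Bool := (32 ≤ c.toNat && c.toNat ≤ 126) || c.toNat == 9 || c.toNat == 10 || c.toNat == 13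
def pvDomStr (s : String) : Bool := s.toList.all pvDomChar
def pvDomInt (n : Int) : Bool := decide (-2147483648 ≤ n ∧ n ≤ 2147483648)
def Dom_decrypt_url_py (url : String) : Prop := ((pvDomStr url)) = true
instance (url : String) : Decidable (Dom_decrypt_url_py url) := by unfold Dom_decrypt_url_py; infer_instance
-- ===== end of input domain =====

-- B rewrites A's sentinel while-loop decoder as a 4-chunk consumer (simpler decomposition, same cost).

-- the alphabet g (shared literal of both Pythons)
-- "MNOPIJKL89+/4567UVWXQRSTEFGHABCDcdefYZabstuvopqr0123wxyzklmnghij" as a char list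
def pvG : List Char := ['M', 'N', 'O', 'P', 'I', 'J', 'K', 'L', '8', '9', '+', '/', '4', '5', '6', '7', 'U', 'V', 'W', 'X', 'Q', 'R', 'S', 'T', 'E', 'F', 'G', 'H', 'A', 'B', 'C', 'D', 'c', 'd', 'e', 'f', 'Y', 'Z', 'a', 'b', 's', 't', 'u', 'v', 'o', 'p', 'q', 'r', '0', '1', '2', '3', 'w', 'x', 'y', 'z', 'k', 'l', 'm', 'n', 'g', 'h', 'i', 'j']

-- XOR pass, identical line for line in A and B: for e in range(c_len*2-1,-1,-1): c[e%n] ^= c[(e+1)%n]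
def pvXorPass (c : List Int) : List Int :=
  let n := PySem.List.len c
  (PySem.List.pyRange (n * 2 - 1) (-1) (-1)).foldl
    (fun c e =>
      let a := PySem.Int.bxor (PySem.List.pyGetD c (PySem.Int.mod e n) 0)
                              (PySem.List.pyGetD c (PySem.Int.mod (e + 1) n) 0)
      PySem.List.pySetD c (PySem.Int.mod e n) a) c

-- ===== PORT A =====
-- A's lookup loop: c = []; for e in url: c.append(g.index(e))  — none = ValueError (excluded by Pre_)
def pvIndexA : List Char → Option (List Int)
  | [] => some []
  | e :: rest =>
    match PySem.List.index? pvG e with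
    | none => none
    | some i =>
      match pvIndexA rest with
      | none => none
      | some c => some ((i : Int) :: c)

-- A's inner f: the while-loop; each iteration consumes 1–4 indices following the nested ifs
-- (the k/j = -1 sentinels become scope: k/j are appended exactly when their branch computed them).
def pvFA : List Int → List Int
  | [] => []
  | a :: rest =>
    let n := a <<< 2
    match rest with
    | [] => [n]                                   -- b := True, k = j = -1
    | b :: rest2 =>
      let n := n + (b >>> 4)
      match rest2 with
      | [] => [n]                                 -- b := True, k = j = -1
      | c :: rest3 =>
        let k := PySem.Int.band (b <<< 4) 255 + (c >>> 2)
        match rest3 with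
        | [] => [n, k]                            -- b := True, j = -1
        | d :: rest4 =>
          let j := PySem.Int.band (c <<< 6) 255 + d
          n :: k :: j :: pvFA rest4

def decrypt_url_py (url : String) : Option String :=
  if url.toList = [] then none                    -- if not url: return None
  else
    match pvIndexA url.toList with
    | none => none                                -- ValueError (outside Pre_)
    | some c =>
      let c := pvFA (pvXorPass c)
      -- d = ''; for e in c: d += chr(e)   (chr ported by hand as Char.ofNat, exact for 0 ≤ e < 0x110000)
      some (String.mk (c.foldl (fun d e => d ++ [Char.ofNat e.toNat]) []))

-- ===== PORT B =====
-- B's decoder: for i in range(0, n, 4): chunk = c[i:i+4]; append 1/2/3 bytes by chunk length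
def pvDecodeB (c : List Int) : List Int :=
  (PySem.List.pyRange 0 (PySem.List.len c) 4).foldl
    (fun out i =>
      let chunk := PySem.List.slice c (some i) (some (i + 4))
      let out := out ++ [(chunk.getD 0 0 <<< 2) + (if 1 < chunk.length then chunk.getD 1 0 >>> 4 else 0)]
      let out := if 2 < chunk.length
        then out ++ [PySem.Int.band (chunk.getD 1 0 <<< 4) 255 + (chunk.getD 2 0 >>> 2)] else out
      if 3 < chunk.length
        then out ++ [PySem.Int.band (chunk.getD 2 0 <<< 6) 255 + chunk.getD 3 0] else out)
    []

def decrypt_url_py_alt (url : String) : Option String :=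
  if url.toList = [] then none
  else
    match (url.toList.mapM (fun e => PySem.List.index? pvG e)) with   -- [g.index(e) for e in url]
    | none => none                                -- ValueError (outside Pre_)
    | some cn =>
      let c := pvXorPass (cn.map (fun i => (i : Int)))
      some (String.mk ((pvDecodeB c).map (fun e => Char.ofNat e.toNat)))  -- ''.join(map(chr, out))

-- ===== PRECONDITION & SPEC =====
-- Pre_ excludes exactly the urls containing a character outside the 64-character alphabet g,
-- on which Python A raises ValueError (g.index).
def Pre_decrypt_url_py (url : String) : Prop := url.toList.all (fun e => pvG.contains e) = true
instance (url : String) : Decidable (Pre_decrypt_url_py url) := by unfold Pre_decrypt_url_py; infer_instance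
def pvWitness_decrypt_url_py : String := "MNOP"

def Spec_decrypt_url_py (url : String) (out : Option String) : Prop := out = decrypt_url_py_alt url
instance (url : String) (out : Option String) : Decidable (Spec_decrypt_url_py url out) := by unfold Spec_decrypt_url_py; infer_instance

-- ===== CLAIM (what is proved, stated in full; the proofs are below) =====
def Claim_equal_decrypt_url_py : Prop := ∀ (url : String), Dom_decrypt_url_py url → Pre_decrypt_url_py url → Spec_decrypt_url_py url (decrypt_url_py url)

-- ===== LEMMAS AND PROOFS =====

-- A's append-one-by-one lookup loop equals B's comprehension (mapM), including the first-failure case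
theorem pvIndexA_eq_mapM (l : List Char) :
    pvIndexA l = (l.mapM (fun e => PySem.List.index? pvG e)).map (fun cn => cn.map (fun i => (i : Int))) := by
  induction l with
  | nil => rfl
  | cons e rest ih =>
    simp only [pvIndexA, List.mapM_cons, ih]
    cases PySem.List.index? pvG e with
    | none => rfl
    | some i =>
      cases rest.mapM (fun e => PySem.List.index? pvG e) <;> rfl

-- step-4 range: induction forms (pyRange_of_pos specialised to step 4)
theorem pyRange4_nil (a b : Int) (h : b ≤ a) : PySem.List.pyRange a b 4 = [] := by
  rw [PySem.List.pyRange_of_pos a b (by norm_num)]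
  simp [if_neg (not_lt.mpr h)]

theorem pyRange4_cons (a b : Int) (h : a < b) :
    PySem.List.pyRange a b 4 = a :: PySem.List.pyRange (a + 4) b 4 := by
  rw [PySem.List.pyRange_of_pos a b (by norm_num), PySem.List.pyRange_of_pos (a + 4) b (by norm_num)]
  have hN : (if a < b then ((b - a + 4 - 1) / 4).toNat else 0)
      = (if a + 4 < b then ((b - (a + 4) + 4 - 1) / 4).toNat else 0) + 1 := by
    rw [if_pos h]; split_ifs <;> omega
  rw [hN, List.range_succ_eq_map]
  simp only [List.map_cons, List.map_map, Function.comp_def]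
  congr 1
  · push_cast; ring
  · exact List.map_congr_left fun k _ => by push_cast; ring

-- the bytes B emits for one chunk c[i:i+4]
def pvChunkOut (chunk : List Int) : List Int :=
  let o := [(chunk.getD 0 0 <<< 2) + (if 1 < chunk.length then chunk.getD 1 0 >>> 4 else 0)]
  let o := if 2 < chunk.length
    then o ++ [PySem.Int.band (chunk.getD 1 0 <<< 4) 255 + (chunk.getD 2 0 >>> 2)] else o
  if 3 < chunk.length
    then o ++ [PySem.Int.band (chunk.getD 2 0 <<< 6) 255 + chunk.getD 3 0] else o

-- one iteration of A's while-loop consumes take 4 / drop 4 and appends B's chunk bytes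
theorem pvFA_chunk (m : List Int) (hm : m ≠ []) :
    pvFA m = pvChunkOut (m.take 4) ++ pvFA (m.drop 4) := by
  match m with
  | [a] => simp [pvFA, pvChunkOut]
  | [a, b] => simp [pvFA, pvChunkOut]
  | [a, b, cc] => simp [pvFA, pvChunkOut]
  | a :: b :: cc :: d :: rest => simp [pvFA, pvChunkOut]

-- B's fold over range(j, n, 4), started anywhere, decodes the corresponding suffix
set_option maxHeartbeats 1000000 in
theorem pvDecodeB_loop (c : List Int) :
    ∀ (fuel j : Nat) (acc : List Int), c.length - j ≤ fuel →
      (PySem.List.pyRange (j : Int) (PySem.List.len c) 4).foldl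
        (fun out i =>
          let chunk := PySem.List.slice c (some i) (some (i + 4))
          let out := out ++ [(chunk.getD 0 0 <<< 2) + (if 1 < chunk.length then chunk.getD 1 0 >>> 4 else 0)]
          let out := if 2 < chunk.length
            then out ++ [PySem.Int.band (chunk.getD 1 0 <<< 4) 255 + (chunk.getD 2 0 >>> 2)] else out
          if 3 < chunk.length
            then out ++ [PySem.Int.band (chunk.getD 2 0 <<< 6) 255 + chunk.getD 3 0] else out)
        acc = acc ++ pvFA (c.drop j) := by
  intro fuel
  induction fuel with
  | zero =>
    intro j acc hj
    have hle : c.length ≤ j := by omega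
    rw [PySem.List.len_eq, pyRange4_nil _ _ (by exact_mod_cast hle)]
    simp [List.drop_eq_nil_of_le hle, pvFA]
  | succ f ih =>
    intro j acc hj
    by_cases hlt : j < c.length
    · rw [PySem.List.len_eq, pyRange4_cons _ _ (by exact_mod_cast hlt)]
      have hcast : ((j : Int) + 4) = ((j + 4 : Nat) : Int) := by push_cast; ring
      rw [List.foldl_cons, hcast]
      simp only [PySem.List.len_eq] at ih
      rw [ih (j + 4) _ (by omega)]
      have hslice : PySem.List.slice c (some (j : Int)) (some ((j + 4 : Nat) : Int)) = (c.drop j).take 4 := by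
        have h4 := PySem.List.slice_natCast_add c j 4
        push_cast at h4 ⊢
        simpa using h4
      have hne : c.drop j ≠ [] := by
        intro h
        have := List.drop_eq_nil_iff.mp h
        omega
      have hdd : (c.drop j).drop 4 = c.drop (j + 4) := by
        simp [List.drop_drop]
      rw [pvFA_chunk (c.drop j) hne, hdd, ← hslice]
      simp only [pvChunkOut]
      split_ifs <;> simp [List.append_assoc]
    · have hle : c.length ≤ j := by omega
      rw [PySem.List.len_eq, pyRange4_nil _ _ (by exact_mod_cast hle)]
      simp [List.drop_eq_nil_of_le hle, pvFA]

-- A's sentinel while-loop decoder equals B's chunked fold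
theorem pvFA_eq_pvDecodeB (m : List Int) : pvFA m = pvDecodeB m := by
  have h := pvDecodeB_loop m m.length 0 [] (by omega)
  simp only [Nat.cast_zero] at h
  unfold pvDecodeB
  rw [h]
  simp

-- ===== VERDICT (by name: the statement is the Claim_ definition above) =====
theorem decrypt_url_py_spec : Claim_equal_decrypt_url_py := by
  intro url _ _
  unfold Spec_decrypt_url_py decrypt_url_py decrypt_url_py_alt
  by_cases h : url.toList = []
  · simp [h]
  · simp only [h, pvIndexA_eq_mapM]
    cases url.toList.mapM (fun e => PySem.List.index? pvG e) with
    | none => rfl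
    | some cn =>
      simp [pvFA_eq_pvDecodeB]
      rw [← List.flatMap_def, ← List.map_eq_flatMap]
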